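-- pv_equiv track=rewrite | github.com/Reneromero08/agent-governance-system | CAPABILITY/SKILLS/inbox/inbox-report-writer/cleanup_report_formatting.py | clean_frontmatter
-- ===== SOURCE A (Python) =====
-- from typing import Dict, List, Tuple
--
-- def clean_frontmatter(frontmatter: str) -> Tuple[str, bool]:
--     """
--     Remove deprecated fields from frontmatter.
--
--     Returns:
--         (cleaned_frontmatter, modified)
--     """
--     modified = False
--     lines = frontmatter.split('\n')
--     cleaned_lines = []
--
--     i = 0
--     while i < len(lines):
--         line = lines[i]
--
--         # Check for hashtags field
--         if line.startswith('hashtags:'):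
--             # Skip this line and any following list items
--             modified = True
--             i += 1
--             # Skip continuation lines (list items or multiline)
--             while i < len(lines) and (lines[i].startswith('- ') or lines[i].startswith('  ')):
--                 i += 1
--             continue
--
--         cleaned_lines.append(line)
--         i += 1
--
--     return '\n'.join(cleaned_lines), modified
-- ===== SOURCE B (Python) =====
-- def clean_frontmatter(frontmatter: str):
--     """
--     Remove deprecated fields from frontmatter.
--
--     Returns:
--         (cleaned_frontmatter, modified)
--     """
--     # Stage 1: group the lines into blocks -- a new block starts at every
--     # line that is not a continuation line ('- ' or '  ' prefix).
--     blocks = []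
--     for line in frontmatter.split('\n'):
--         if blocks and (line.startswith('- ') or line.startswith('  ')):
--             blocks[-1].append(line)
--         else:
--             blocks.append([line])
--     # Stage 2: keep only the blocks not headed by a 'hashtags:' line.
--     kept = [b for b in blocks if not b[0].startswith('hashtags:')]
--     # Stage 3: flatten the surviving blocks back into text.
--     return '\n'.join(line for b in kept for line in b), len(kept) != len(blocks)
-- ===== Notes on version B (the rewrite author's own statement) =====
-- stated objective: alternative
-- what changed: Replaces A's single skip-pass (outer index loop with an inner continuation-skipping loop) by a three-stage group/filter/flatten pipeline: lines are first grouped into blocks at every non-continuation line, then whole blocks headed by 'hashtags:' are filtered out, then the survivors are flattened; 'modified' falls out as a length comparison of the block lists.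
import Mathlib
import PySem

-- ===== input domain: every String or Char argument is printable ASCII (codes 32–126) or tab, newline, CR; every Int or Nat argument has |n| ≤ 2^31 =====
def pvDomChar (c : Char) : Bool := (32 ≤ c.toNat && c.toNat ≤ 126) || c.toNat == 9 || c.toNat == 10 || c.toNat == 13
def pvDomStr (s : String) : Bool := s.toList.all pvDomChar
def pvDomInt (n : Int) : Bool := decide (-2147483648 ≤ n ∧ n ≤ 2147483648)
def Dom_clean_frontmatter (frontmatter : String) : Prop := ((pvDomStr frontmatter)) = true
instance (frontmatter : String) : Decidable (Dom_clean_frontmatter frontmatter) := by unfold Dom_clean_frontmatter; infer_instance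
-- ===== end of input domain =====

-- B replaces A's skip-pass by a group-into-blocks / filter / flatten pipeline (objective: alternative).

-- ===== PORT A =====
-- continuation line test: lines[i].startswith('- ') or lines[i].startswith('  ')
def contA (l : String) : Bool :=
  PySem.Str.startswith l "- " || PySem.Str.startswith l "  "

-- the while-loop over i: recursion on the suffix of lines; the inner while is dropWhile
def goA : List String → List String × Bool
  | [] => ([], false)
  | l :: rest =>
    if PySem.Str.startswith l "hashtags:" then
      ((goA (rest.dropWhile contA)).1, true)
    else
      (l :: (goA rest).1, (goA rest).2)
termination_by xs => xs.length
decreasing_by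
  all_goals first
    | exact Nat.lt_succ_of_le (List.length_dropWhile_le _ _)
    | simp

def clean_frontmatter (frontmatter : String) : String × Bool :=
  let r := goA ((PySem.Str.split? frontmatter "\n").getD [])
  (PySem.Str.join "\n" r.1, r.2)

-- ===== PORT B =====
def contB (l : String) : Bool :=
  PySem.Str.startswith l "- " || PySem.Str.startswith l "  "

-- one step of stage 1: 'blocks[-1].append(line)' or 'blocks.append([line])'
def stepB (bs : List (List String)) (line : String) : List (List String) :=
  match bs with
  | [] => [[line]]
  | _ :: _ =>
    if contB line then bs.dropLast ++ [bs.getLastD [] ++ [line]]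
    else bs ++ [[line]]

-- 'not b[0].startswith("hashtags:")' — blocks produced by stage 1 are nonempty, headD is exact
def keepB (b : List String) : Bool :=
  !(PySem.Str.startswith (b.headD "") "hashtags:")

def clean_frontmatter_alt (frontmatter : String) : String × Bool :=
  let blocks := ((PySem.Str.split? frontmatter "\n").getD []).foldl stepB []
  let kept := blocks.filter keepB
  (PySem.Str.join "\n" kept.flatten, kept.length != blocks.length)

-- ===== PRECONDITION & SPEC =====
def Spec_clean_frontmatter (frontmatter : String) (out : String × Bool) : Prop := out = clean_frontmatter_alt frontmatter
instance (frontmatter : String) (out : String × Bool) : Decidable (Spec_clean_frontmatter frontmatter out) := by unfold Spec_clean_frontmatter; infer_instance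

-- ===== CLAIM (what is proved, stated in full; the proofs are below) =====
def Claim_equal_clean_frontmatter : Prop := ∀ (frontmatter : String), Dom_clean_frontmatter frontmatter → Spec_clean_frontmatter frontmatter (clean_frontmatter frontmatter)

-- ===== LEMMAS AND PROOFS =====

-- recursive characterisation of stage 1's grouping
def blocksOf : List String → List (List String)
  | [] => []
  | l :: rest => (l :: rest.takeWhile contB) :: blocksOf (rest.dropWhile contB)
termination_by xs => xs.length
decreasing_by exact Nat.lt_succ_of_le (List.length_dropWhile_le _ _)

lemma contA_eq_contB : contA = contB := rfl

-- a continuation line never starts with "hashtags:"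
lemma cont_not_hash (l : String) (h : contB l = true) :
    PySem.Str.startswith l "hashtags:" = false := by
  simp only [contB, Bool.or_eq_true, PySem.Str.startswith_eq,
    PySem.Chars.startswith_iff] at h
  rw [PySem.Str.startswith_eq, Bool.eq_false_iff]
  intro hp
  rw [PySem.Chars.startswith_iff] at hp
  rcases h with h | h <;>
  · obtain ⟨t, ht⟩ := h
    obtain ⟨u, hu⟩ := hp
    rw [← ht] at hu
    simp at hu

lemma foldl_stepB_eq (lines : List String) : ∀ (bs : List (List String)) (b : List String),
    lines.foldl stepB (bs ++ [b]) =
      (bs ++ [b ++ lines.takeWhile contB]) ++ blocksOf (lines.dropWhile contB) := by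
  induction lines with
  | nil => intro bs b; simp [blocksOf]
  | cons l rest ih =>
    intro bs b
    by_cases h : contB l = true
    · have hs : stepB (bs ++ [b]) l = bs ++ [b ++ [l]] := by
        cases bs with
        | nil => simp [stepB, h]
        | cons x xs =>
          show (if contB l then ((x :: xs) ++ [b]).dropLast ++ [((x :: xs) ++ [b]).getLastD [] ++ [l]] else _) = _
          rw [if_pos h, List.dropLast_concat, List.getLastD_eq_getLast?, List.getLast?_concat]
          rfl
      rw [List.foldl_cons, hs, ih bs (b ++ [l])]
      simp [h]
    · simp only [Bool.not_eq_true] at h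
      have hs : stepB (bs ++ [b]) l = (bs ++ [b]) ++ [[l]] := by
        cases bs <;> simp [stepB, h]
      rw [List.foldl_cons, hs, ih (bs ++ [b]) [l]]
      simp [blocksOf, h]

lemma foldl_stepB_nil (lines : List String) :
    lines.foldl stepB [] = blocksOf lines := by
  cases lines with
  | nil => simp [blocksOf]
  | cons l rest =>
    have hs : stepB [] l = [] ++ [[l]] := rfl
    rw [List.foldl_cons, hs, foldl_stepB_eq rest [] [l], blocksOf]
    simp

-- A keeps an initial run of continuation lines verbatim (none of them is a 'hashtags:' header)
lemma goA_takeWhile (lines : List String) :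
    goA lines = (lines.takeWhile contB ++ (goA (lines.dropWhile contB)).1,
                 (goA (lines.dropWhile contB)).2) := by
  induction lines with
  | nil => simp [goA]
  | cons l rest ih =>
    by_cases h : contB l = true
    · rw [goA, if_neg (by rw [cont_not_hash l h]; simp), ih]
      simp [h]
    · simp only [Bool.not_eq_true] at h
      simp [h]

-- modified: len(kept) != len(blocks) is 'some block fails keepB'
lemma length_filter_bne {α : Type} (p : α → Bool) (l : List α) :
    ((l.filter p).length != l.length) = l.any (fun x => !p x) := by
  induction l with
  | nil => simp
  | cons x l ih =>
    by_cases h : p x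
    · simpa [List.filter_cons, h, Nat.succ_ne_succ_iff] using ih
    · simp only [Bool.not_eq_true] at h
      have hle := List.length_filter_le p l
      simp [h, Nat.ne_of_lt (Nat.lt_succ_of_le hle)]

-- the main correspondence: A's skip-pass computes B's filter/flatten of the blocks
lemma goA_blocksOf : ∀ (n : Nat) (lines : List String), lines.length ≤ n →
    goA lines = (((blocksOf lines).filter keepB).flatten,
                 (blocksOf lines).any (fun b => !keepB b)) := by
  intro n
  induction n with
  | zero =>
    intro lines hl
    rw [List.length_eq_zero_iff.mp (Nat.le_zero.mp hl)]
    simp [goA, blocksOf]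
  | succ n ih =>
    intro lines hl
    match lines with
    | [] => simp [goA, blocksOf]
    | l :: rest =>
      have hlen : (rest.dropWhile contB).length ≤ n :=
        le_trans (List.length_dropWhile_le _ _) (Nat.le_of_succ_le_succ hl)
      by_cases h : PySem.Str.startswith l "hashtags:" = true
      · have h' : PySem.Chars.startswith l.toList
            ['h', 'a', 's', 'h', 't', 'a', 'g', 's', ':'] = true := by simpa using h
        rw [goA, if_pos h, blocksOf, contA_eq_contB, ih _ hlen]
        simp [keepB, h']
      · have h' : PySem.Chars.startswith l.toList
            ['h', 'a', 's', 'h', 't', 'a', 'g', 's', ':'] = false := by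
          simpa using h
        rw [goA, if_neg h, goA_takeWhile rest, blocksOf, ih _ hlen]
        simp [keepB, h']

-- ===== VERDICT (by name: the statement is the Claim_ definition above) =====
theorem clean_frontmatter_spec : Claim_equal_clean_frontmatter := by
  intro f _
  show _ = _
  simp only [clean_frontmatter, clean_frontmatter_alt, foldl_stepB_nil,
    goA_blocksOf ((PySem.Str.split? f "\n").getD []).length _ le_rfl,
    length_filter_bne]
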